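-- pv_equiv track=rewrite | github.com/a851445115/openclaw-workspace | plugins/multi-agent-orchestrator/scripts/lib/milestones.py | normalize_token_list
-- ===== SOURCE A (Python) =====
-- from typing import Any, Dict, List, Optional, Tuple
--
-- def clip(text: Optional[str], limit: int = 160) -> str:
--     s = " ".join((text or "").split())
--     if len(s) <= limit:
--         return s
--     return s[: limit - 1] + "..."
--
-- def normalize_token_list(value: Any, limit: int = 8, item_limit: int = 80) -> List[str]:
--     out: List[str] = []
--     if isinstance(value, str):
--         s = clip(value.strip().lower(), item_limit)
--         if s:
--             out.append(s)
--         return out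
--     if not isinstance(value, list):
--         return out
--     for item in value:
--         s = clip(str(item or "").strip().lower(), item_limit)
--         if not s or s in out:
--             continue
--         out.append(s)
--         if len(out) >= limit:
--             break
--     return out
-- ===== SOURCE B (Python) =====
-- from typing import Any, List, Optional
--
--
-- def clip(text: Optional[str], limit: int = 160) -> str:
--     s = " ".join((text or "").split())
--     if len(s) <= limit:
--         return s
--     return s[: limit - 1] + "..."
--
--
-- def normalize_token_list(value: Any, limit: int = 8, item_limit: int = 80) -> List[str]:
--     if isinstance(value, str):
--         s = clip(value.strip().lower(), item_limit)
--         return [s] if s else []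
--     if not isinstance(value, list):
--         return []
--     if limit <= 0:
--         return []
--     tokens = [t for item in value if (t := clip(str(item or "").strip().lower(), item_limit))]
--     return list(dict.fromkeys(tokens))[:limit]
-- ===== Notes on version B (the rewrite author's own statement) =====
-- stated objective: idiomatic
-- what changed: The guarded accumulate-and-break loop with a linear `s in out` membership scan per item is replaced by a pipeline: normalize all items in one comprehension (dropping blank tokens), deduplicate preserving first occurrence with dict.fromkeys, and slice the result to the limit; for a non-positive limit B short-circuits to no output.
-- intended difference: When limit <= 0 and some item normalizes to a non-blank token (it has a non-whitespace character, or, for item_limit < 0, any item at all since clip then always appends an ellipsis), A still returns that first token because its break is tested only after appending, while B returns no tokens, the intended meaning of a non-positive limit. — e.g. on normalize_token_list(["a"], 0, 80): A returns ["a"], B returns []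
import Mathlib
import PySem

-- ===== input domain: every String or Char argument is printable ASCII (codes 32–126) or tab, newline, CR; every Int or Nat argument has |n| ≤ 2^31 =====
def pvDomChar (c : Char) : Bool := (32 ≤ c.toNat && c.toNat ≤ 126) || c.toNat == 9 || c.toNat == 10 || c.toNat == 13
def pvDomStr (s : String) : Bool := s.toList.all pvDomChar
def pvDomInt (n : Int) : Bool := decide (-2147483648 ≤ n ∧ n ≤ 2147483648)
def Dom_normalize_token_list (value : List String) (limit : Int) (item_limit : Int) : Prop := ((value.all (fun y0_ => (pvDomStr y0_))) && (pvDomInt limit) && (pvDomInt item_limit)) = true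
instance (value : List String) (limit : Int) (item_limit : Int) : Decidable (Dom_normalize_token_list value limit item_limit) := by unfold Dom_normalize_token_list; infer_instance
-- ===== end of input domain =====

-- B replaces A's accumulate-with-break loop by a normalize/dedup/slice pipeline (idiomatic, not claimed faster);
-- on a non-positive limit B intentionally returns no tokens where A still emits one (see D_ below).

-- ===== PORT A =====
-- module helper `clip`, shared verbatim by Source A and Source B
def clip (text : String) (limit : Int) : String :=
  let s := PySem.Str.join " " (PySem.Str.split₀ text)
  if PySem.Str.len s ≤ limit then s
  else PySem.Str.slice s none (some (limit - 1)) ++ "..."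

-- the `for item in value` loop of A (value is typed List String, so the isinstance(str) branch is dead and
-- the isinstance(list) guard passes; `str(item or "")` is `item` itself for a string argument)
def pvALoop (limit item_limit : Int) (out : List String) : List String → List String
  | [] => out
  | item :: rest =>
    let s := clip (PySem.Str.lower (PySem.Str.strip item)) item_limit
    if s = "" ∨ s ∈ out then pvALoop limit item_limit out rest
    else if limit ≤ ((out ++ [s]).length : Int) then out ++ [s]
    else pvALoop limit item_limit (out ++ [s]) rest

def normalize_token_list (value : List String) (limit : Int) (item_limit : Int) : List String :=
  pvALoop limit item_limit [] value

-- ===== PORT B =====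
def normalize_token_list_alt (value : List String) (limit : Int) (item_limit : Int) : List String :=
  if limit ≤ 0 then []
  else
    let tokens := (value.map (fun item => clip (PySem.Str.lower (PySem.Str.strip item)) item_limit)).filter
      (fun t => decide (t ≠ ""))
    PySem.List.slice (PySem.List.dedup tokens) none (some limit)

-- ===== PRECONDITION & SPEC =====
-- When limit ≤ 0 and some item normalizes to a non-empty token (it has a non-whitespace character, or,
-- for item_limit < 0, the list is merely non-empty since clip then always appends "..."), A still returns
-- that first token because its break is tested only after appending, while B returns no tokens, the
-- intended meaning of a non-positive limit.
def D_normalize_token_list (value : List String) (limit : Int) (item_limit : Int) : Prop :=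
  limit ≤ 0 ∧
    ((0 ≤ item_limit ∧ value.any (fun s => s.toList.any (fun c => !(PySem.Chars.isspace c))) = true) ∨
     (item_limit < 0 ∧ value ≠ []))
instance (value : List String) (limit : Int) (item_limit : Int) : Decidable (D_normalize_token_list value limit item_limit) := by unfold D_normalize_token_list; infer_instance

def Spec_normalize_token_list (value : List String) (limit : Int) (item_limit : Int) (out : List String) : Prop := ¬ D_normalize_token_list value limit item_limit → out = normalize_token_list_alt value limit item_limit
instance (value : List String) (limit : Int) (item_limit : Int) (out : List String) : Decidable (Spec_normalize_token_list value limit item_limit out) := by unfold Spec_normalize_token_list; infer_instance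

def pvDiffWitness_normalize_token_list : List String × Int × Int := (["a"], 0, 80)
def pvDiffWitnessOut_normalize_token_list : (List String) × (List String) := (["a"], [])

-- ===== CLAIM (what is proved, stated in full; the proofs are below) =====
def Claim_unchanged_normalize_token_list : Prop := ∀ (value : List String) (limit : Int) (item_limit : Int), Dom_normalize_token_list value limit item_limit → Spec_normalize_token_list value limit item_limit (normalize_token_list value limit item_limit)
def Claim_changed_normalize_token_list : Prop := Dom_normalize_token_list (pvDiffWitness_normalize_token_list.1) (pvDiffWitness_normalize_token_list.2.1) (pvDiffWitness_normalize_token_list.2.2) ∧ D_normalize_token_list (pvDiffWitness_normalize_token_list.1) (pvDiffWitness_normalize_token_list.2.1) (pvDiffWitness_normalize_token_list.2.2) ∧ normalize_token_list (pvDiffWitness_normalize_token_list.1) (pvDiffWitness_normalize_token_list.2.1) (pvDiffWitness_normalize_token_list.2.2) = pvDiffWitnessOut_normalize_token_list.1 ∧ normalize_token_list_alt (pvDiffWitness_normalize_token_list.1) (pvDiffWitness_normalize_token_list.2.1) (pvDiffWitness_normalize_token_list.2.2) = pvDiffWitnessOut_normalize_token_list.2 ∧ pvDiffWitnessOut_normalize_token_list.1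 ≠ pvDiffWitnessOut_normalize_token_list.2
def Claim_exact_normalize_token_list : Prop := ∀ (value : List String) (limit : Int) (item_limit : Int), Dom_normalize_token_list value limit item_limit → D_normalize_token_list value limit item_limit → normalize_token_list value limit item_limit ≠ normalize_token_list_alt value limit item_limit

-- ===== LEMMAS AND PROOFS =====

-- abbreviation used only by the proofs: the normalized token of one item
def pvNorm (il : Int) (item : String) : String :=
  clip (PySem.Str.lower (PySem.Str.strip item)) il

-- the tokens A appends after `out` when no break fires (proof-only helper)
def pvNew (il : Int) (out : List String) : List String → List String
  | [] => []
  | i :: r =>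
    let s := pvNorm il i
    if s = "" ∨ s ∈ out then pvNew il out r
    else s :: pvNew il (out ++ [s]) r

-- ---- character-level facts ----

theorem pv_isspace_false (d : Char) (h1 : 65 ≤ d.toNat) (h2 : d.toNat ≤ 122) :
    PySem.Chars.isspace d = false := by
  unfold PySem.Chars.isspace
  simp only [Bool.or_eq_false_iff, Bool.and_eq_false_iff, decide_eq_false_iff_not]
  omega

theorem pv_ws_lowerChar (c : Char) :
    PySem.Chars.isspace (PySem.Chars.lowerChar c) = PySem.Chars.isspace c := by
  unfold PySem.Chars.lowerChar
  by_cases h : PySem.Chars.isupper c = true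
  · simp only [h, if_pos]
    have hA : 'A' ≤ c ∧ c ≤ 'Z' := by
      unfold PySem.Chars.isupper at h; simp at h; exact h
    have hb : 65 ≤ c.toNat ∧ c.toNat ≤ 90 := ⟨hA.1, hA.2⟩
    have hv : (c.toNat + 32).isValidChar := Or.inl (by omega)
    have ht : (Char.ofNat (c.toNat + 32)).toNat = c.toNat + 32 := by
      simp [Char.ofNat, hv]
    rw [pv_isspace_false _ (by omega) (by omega), pv_isspace_false _ (by omega) (by omega)]
  · simp [h]

theorem pv_split_go_nil (cs : List Char) : ∀ cur acc, PySem.Chars.split₀.go cs cur acc = [] →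
    acc = [] ∧ cur = [] ∧ ∀ c ∈ cs, PySem.Chars.isspace c = true := by
  induction cs with
  | nil =>
    intro cur acc h
    rw [PySem.Chars.split₀.go] at h
    split_ifs at h with hc
    · simp at h
      simp [h, List.isEmpty_iff.mp hc]
    · simp at h
  | cons c rest ih =>
    intro cur acc h
    rw [PySem.Chars.split₀.go] at h
    split_ifs at h with hws hc
    · obtain ⟨ha, -, hall⟩ := ih _ _ h
      refine ⟨ha, List.isEmpty_iff.mp hc, ?_⟩
      intro x hx
      rw [List.mem_cons] at hx
      rcases hx with rfl | hx
      · exact hws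
      · exact hall _ hx
    · obtain ⟨ha, -, -⟩ := ih _ _ h
      simp at ha
    · obtain ⟨-, hcur, -⟩ := ih _ _ h
      simp at hcur

theorem pv_split_go_pieces (cs : List Char) : ∀ cur acc, (∀ p ∈ acc, p ≠ ([] : List Char)) →
    ∀ p ∈ PySem.Chars.split₀.go cs cur acc, p ≠ [] := by
  induction cs with
  | nil =>
    intro cur acc hacc p hp
    rw [PySem.Chars.split₀.go] at hp
    split_ifs at hp with hc
    · exact hacc _ (by simpa using hp)
    · simp at hp
      rcases hp with h | h
      · exact hacc _ h
      · subst h; simpa [List.isEmpty_iff] using hc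
  | cons c rest ih =>
    intro cur acc hacc p hp
    rw [PySem.Chars.split₀.go] at hp
    split_ifs at hp with hws hc
    · exact ih _ _ hacc _ hp
    · refine ih _ _ ?_ _ hp
      intro q hq
      rw [List.mem_cons] at hq
      rcases hq with rfl | hq
      · simpa [List.isEmpty_iff] using hc
      · exact hacc _ hq
    · exact ih _ _ hacc _ hp

theorem pv_intercalate_ne_nil (sep p : List Char) (ps : List (List Char)) (hp : p ≠ []) :
    List.intercalate sep (p :: ps) ≠ [] := by
  cases ps with
  | nil => simpa [List.intercalate] using hp
  | cons q r =>
    rw [List.intercalate, List.intersperse_cons₂, List.flatten_cons]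
    intro h
    rw [List.append_eq_nil_iff] at h
    exact hp h.1

theorem pv_clip_nil (il : Int) (h0 : 0 ≤ il) : clip "" il = "" := by
  have h1 : PySem.Chars.split₀ ([] : List Char) = [] := rfl
  simp [clip, PySem.Str.split₀, PySem.Str.join, PySem.Chars.join, PySem.Str.len, h1,
    List.intercalate, h0]

theorem pv_join_ne (t : String)
    (h : ∃ c ∈ t.toList, ¬ PySem.Chars.isspace c = true) :
    (PySem.Str.join " " (PySem.Str.split₀ t)).toList ≠ [] := by
  obtain ⟨c, hc, hws⟩ := h
  have hsp : PySem.Chars.split₀ t.toList ≠ [] := by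
    intro hnil
    exact hws ((pv_split_go_nil t.toList [] [] hnil).2.2 c hc)
  obtain ⟨p, ps, hp⟩ := List.exists_cons_of_ne_nil hsp
  have hpe : p ≠ [] := by
    refine pv_split_go_pieces t.toList [] [] (by simp) p ?_
    rw [show PySem.Chars.split₀.go t.toList [] [] = PySem.Chars.split₀ t.toList from rfl, hp]
    simp
  simp only [PySem.Str.join, PySem.Str.split₀, PySem.Chars.join]
  rw [hp]
  rw [String.toList_ofList]
  have hmap : (String.toList ∘ String.ofList) = id := by
    funext l; simp
  rw [List.map_map, hmap, List.map_id]
  exact pv_intercalate_ne_nil _ _ _ hpe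

theorem pv_clip_ne (t : String) (il : Int)
    (h : ∃ c ∈ t.toList, ¬ PySem.Chars.isspace c = true) : clip t il ≠ "" := by
  have hj := pv_join_ne t h
  unfold clip
  dsimp only
  split_ifs
  · intro he; rw [he] at hj; exact hj rfl
  · intro he
    have := congrArg String.toList he
    rw [String.toList_append] at this
    simp at this

theorem pv_clip_ne_neg (t : String) (il : Int) (hneg : il < 0) : clip t il ≠ "" := by
  unfold clip
  dsimp only
  rw [if_neg (by simp only [PySem.Str.len]; omega)]
  intro he
  have := congrArg String.toList he
  rw [String.toList_append] at this
  simp at this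

-- ---- norm-level facts ----

theorem pv_mem_dropWhile {c : Char} {p : Char → Bool} {l : List Char}
    (hc : c ∈ l) (hp : ¬ p c = true) : c ∈ l.dropWhile p := by
  have := List.takeWhile_append_dropWhile (p := p) (l := l)
  rw [← this, List.mem_append] at hc
  rcases hc with h | h
  · exact absurd (List.mem_takeWhile_imp h) hp
  · exact h

theorem pv_norm_ne (il : Int) (item : String)
    (h : item.toList.any (fun c => !(PySem.Chars.isspace c)) = true) : pvNorm il item ≠ "" := by
  rw [List.any_eq_true] at h
  obtain ⟨c, hc, hws⟩ := h
  rw [Bool.not_eq_true'] at hws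
  apply pv_clip_ne
  refine ⟨PySem.Chars.lowerChar c, ?_, by simp [pv_ws_lowerChar, hws]⟩
  rw [PySem.Str.toList_lower, PySem.Chars.lower]
  apply List.mem_map_of_mem
  rw [PySem.Str.toList_strip, PySem.Chars.strip, PySem.Chars.rstrip, PySem.Chars.lstrip]
  rw [List.mem_reverse]
  apply pv_mem_dropWhile _ (by simp [hws])
  rw [List.mem_reverse]
  exact pv_mem_dropWhile hc (by simp [hws])

theorem pv_norm_empty (il : Int) (h0 : 0 ≤ il) (item : String)
    (h : item.toList.any (fun c => !(PySem.Chars.isspace c)) = false) : pvNorm il item = "" := by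
  have hall : ∀ c ∈ item.toList, PySem.Chars.isspace c = true := by
    intro c hc
    rw [List.any_eq_false] at h
    have := h c hc
    simpa using this
  have ht : (PySem.Str.lower (PySem.Str.strip item)) = "" := by
    rw [← String.toList_eq_nil_iff]
    rw [PySem.Str.toList_lower, PySem.Str.toList_strip, PySem.Chars.strip, PySem.Chars.lstrip]
    have h1 : item.toList.dropWhile PySem.Chars.isspace = [] :=
      List.dropWhile_eq_nil_iff.mpr (fun x hx => hall x hx)
    rw [h1]
    rfl
  rw [pvNorm, ht]
  exact pv_clip_nil il h0

theorem pv_norm_ne_neg (il : Int) (item : String) (h : il < 0) : pvNorm il item ≠ "" :=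
  pv_clip_ne_neg _ _ h

-- ---- loop-level facts ----

theorem pvALoop_cons (L il : Int) (out : List String) (i : String) (r : List String) :
    pvALoop L il out (i :: r) =
      (let s := pvNorm il i
       if s = "" ∨ s ∈ out then pvALoop L il out r
       else if L ≤ ((out ++ [s]).length : Int) then out ++ [s]
       else pvALoop L il (out ++ [s]) r) := rfl

theorem pvNew_cons (il : Int) (out : List String) (i : String) (r : List String) :
    pvNew il out (i :: r) =
      (let s := pvNorm il i
       if s = "" ∨ s ∈ out then pvNew il out r
       else s :: pvNew il (out ++ [s]) r) := rfl

theorem pvALoop_prefix (L il : Int) (rest : List String) : ∀ out,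
    ∃ t, pvALoop L il out rest = out ++ t := by
  induction rest with
  | nil => intro out; exact ⟨[], by simp [pvALoop]⟩
  | cons i r ih =>
    intro out
    rw [pvALoop_cons]
    dsimp only
    split_ifs with h1 h2
    · exact ih out
    · exact ⟨[pvNorm il i], rfl⟩
    · obtain ⟨t, ht⟩ := ih (out ++ [pvNorm il i])
      exact ⟨[pvNorm il i] ++ t, by rw [ht, List.append_assoc]⟩

theorem pvALoop_skip (L il : Int) (rest : List String)
    (h : ∀ i ∈ rest, pvNorm il i = "") : ∀ out, pvALoop L il out rest = out := by
  induction rest with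
  | nil => intro out; rfl
  | cons i r ih =>
    intro out
    rw [pvALoop_cons]
    dsimp only
    rw [if_pos (Or.inl (h i (by simp)))]
    exact ih (fun j hj => h j (by simp [hj])) out

theorem pvALoop_ne_nil (L il : Int) (rest : List String) : ∀ out,
    (out ≠ [] ∨ ∃ i ∈ rest, pvNorm il i ≠ "") → pvALoop L il out rest ≠ [] := by
  induction rest with
  | nil =>
    intro out h
    rcases h with h | h
    · exact h
    · simp at h
  | cons i r ih =>
    intro out h
    rw [pvALoop_cons]
    dsimp only
    split_ifs with h1 h2
    · apply ih
      rcases h with ho | ⟨j, hj, hne⟩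
      · exact Or.inl ho
      · rw [List.mem_cons] at hj
        rcases hj with rfl | hj
        · rcases h1 with he | hm
          · exact absurd he hne
          · exact Or.inl (List.ne_nil_of_mem hm)
        · exact Or.inr ⟨j, hj, hne⟩
    · simp
    · obtain ⟨t, ht⟩ := pvALoop_prefix L il r (out ++ [pvNorm il i])
      rw [ht]
      simp

theorem pvALoop_eq_new (L il : Int) (rest : List String) : ∀ out, (out.length : Int) < L →
    pvALoop L il out rest = out ++ (pvNew il out rest).take (L.toNat - out.length) := by
  induction rest with
  | nil => intro out h; simp [pvALoop, pvNew]
  | cons i r ih =>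
    intro out h
    rw [pvALoop_cons, pvNew_cons]
    dsimp only
    split_ifs with h1 h2
    · exact ih out h
    · have hk : L.toNat - out.length = 1 := by
        simp at h2
        omega
      rw [hk, List.take_succ_cons, List.take_zero]
    · have h' : (((out ++ [pvNorm il i]).length : Int)) < L := by
        simp at h2 ⊢
        omega
      rw [ih _ h']
      have hk : L.toNat - out.length = (L.toNat - (out ++ [pvNorm il i]).length) + 1 := by
        simp
        omega
      rw [hk, List.take_succ_cons, List.append_assoc]
      rfl

theorem pvNew_foldl (il : Int) (rest : List String) : ∀ out,
    out ++ pvNew il out rest =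
      List.foldl PySem.Set.add out ((rest.map (pvNorm il)).filter (fun t => decide (t ≠ ""))) := by
  induction rest with
  | nil => intro out; simp [pvNew]
  | cons i r ih =>
    intro out
    rw [pvNew_cons]
    dsimp only
    rw [List.map_cons]
    by_cases he : pvNorm il i = ""
    · rw [if_pos (Or.inl he), List.filter_cons_of_neg (by simp [he])]
      exact ih out
    · rw [List.filter_cons_of_pos (by simp [he]), List.foldl_cons]
      by_cases hm : pvNorm il i ∈ out
      · rw [if_pos (Or.inr hm)]
        have : PySem.Set.add out (pvNorm il i) = out := by
          rw [PySem.Set.add, if_pos]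
          rw [PySem.Set.contains_iff]
          exact hm
        rw [this]
        exact ih out
      · rw [if_neg (by tauto)]
        have : PySem.Set.add out (pvNorm il i) = out ++ [pvNorm il i] := by
          rw [PySem.Set.add, if_neg]
          rw [PySem.Set.contains_iff]
          exact hm
        rw [this, ← ih (out ++ [pvNorm il i])]
        simp

-- ===== VERDICT (by name: the statement is the Claim_ definition above) =====
theorem normalize_token_list_spec : Claim_unchanged_normalize_token_list := by
  intro v L il _dom hnd
  show normalize_token_list v L il = normalize_token_list_alt v L il
  by_cases hl : L ≤ 0
  · have halt : normalize_token_list_alt v L il = [] := by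
      rw [normalize_token_list_alt, if_pos hl]
    rw [halt, normalize_token_list]
    have hxy : ¬ ((0 ≤ il ∧ v.any (fun s => s.toList.any (fun c => !(PySem.Chars.isspace c))) = true) ∨
        (il < 0 ∧ v ≠ [])) := fun h => hnd ⟨hl, h⟩
    by_cases hil : 0 ≤ il
    · have hany : v.any (fun s => s.toList.any (fun c => !(PySem.Chars.isspace c))) = false := by
        rcases Bool.eq_false_or_eq_true (v.any (fun s => s.toList.any (fun c => !(PySem.Chars.isspace c)))) with h | h
        · exact absurd (Or.inl ⟨hil, h⟩) hxy
        · exact h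
      rw [List.any_eq_false] at hany
      exact pvALoop_skip L il v (fun i hi => pv_norm_empty il hil i (by simpa using hany i hi)) []
    · push Not at hil
      have hv : v = [] := by
        by_contra h
        exact hxy (Or.inr ⟨hil, h⟩)
      subst hv
      rfl
  · push Not at hl
    have h0 : ((([] : List String)).length : Int) < L := by simpa using hl
    rw [normalize_token_list, pvALoop_eq_new L il v [] h0]
    have hfold := pvNew_foldl il v []
    rw [List.nil_append] at hfold
    rw [normalize_token_list_alt, if_neg (by omega)]
    have hfun : (fun item => clip (PySem.Str.lower (PySem.Str.strip item)) il) = pvNorm il := rfl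
    dsimp only
    rw [hfun]
    have hded : PySem.List.dedup ((v.map (pvNorm il)).filter (fun t => decide (t ≠ ""))) =
        List.foldl PySem.Set.add [] ((v.map (pvNorm il)).filter (fun t => decide (t ≠ ""))) := rfl
    rw [hded, ← hfold, PySem.List.slice_to _ (by omega)]
    simp

theorem normalize_token_list_changed : Claim_changed_normalize_token_list := by
  unfold Claim_changed_normalize_token_list; decide

theorem normalize_token_list_tight : Claim_exact_normalize_token_list := by
  intro v L il _dom hd
  obtain ⟨hl, hxy⟩ := hd
  have halt : normalize_token_list_alt v L il = [] := by
    rw [normalize_token_list_alt, if_pos hl]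
  rw [halt, normalize_token_list]
  apply pvALoop_ne_nil
  right
  rcases hxy with ⟨hil, hany⟩ | ⟨hil, hne⟩
  · rw [List.any_eq_true] at hany
    obtain ⟨s, hs, hh⟩ := hany
    exact ⟨s, hs, pv_norm_ne il s hh⟩
  · obtain ⟨i, r, rfl⟩ := List.exists_cons_of_ne_nil hne
    exact ⟨i, by simp, pv_norm_ne_neg il i hil⟩
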